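-- pv_equiv track=rewrite | github.com/ihaque/grizzly | sklearn_utils.py | _parse_docstring_for_params
-- ===== SOURCE A (Python) =====
-- def _parse_docstring_for_params(docstring):
--     BEFORE_PARAM = 0
--     PARAM_HEADER = 1
--     IN_PARAM = 2
--     state = BEFORE_PARAM
--     param_text = []
--     for line in docstring.split('\n'):
--         if state == BEFORE_PARAM:
--             if 'Parameters' in line:
--                 state = PARAM_HEADER
--                 param_text.append(line)
--         elif state == PARAM_HEADER:
--             state = IN_PARAM
--             param_text.append(line)
--         elif state == IN_PARAM:
--             sline = line.strip()
--             if sline and all(ch == '-' for ch in sline):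
--                 # Reached the next section; pop the prev line.
--                 param_text.pop()
--                 break
--             else:
--                 param_text.append(line)
--         else:
--             assert False, "Bad state in parser"
--     return '\n'.join(param_text)
-- ===== SOURCE B (Python) =====
-- def _is_dash_line(line):
--     s = line.strip()
--     return bool(s) and set(s) == {'-'}
--
--
-- def _parse_docstring_for_params(docstring):
--     lines = docstring.split('\n')
--     i = next((k for k, line in enumerate(lines) if 'Parameters' in line), None)
--     if i is None:
--         return ''
--     j = next((k for k in range(i + 2, len(lines)) if _is_dash_line(lines[k])), None)
--     if j is None:
--         return '\n'.join(lines[i:])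
--     return '\n'.join(lines[i:j - 1])
-- ===== Notes on version B (the rewrite author's own statement) =====
-- stated objective: simpler
-- what changed: Replaced the three-state parser loop with a find-then-slice decomposition: locate the 'Parameters' line, locate the next dashed underline, and join one slice of the line list.
import Mathlib
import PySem

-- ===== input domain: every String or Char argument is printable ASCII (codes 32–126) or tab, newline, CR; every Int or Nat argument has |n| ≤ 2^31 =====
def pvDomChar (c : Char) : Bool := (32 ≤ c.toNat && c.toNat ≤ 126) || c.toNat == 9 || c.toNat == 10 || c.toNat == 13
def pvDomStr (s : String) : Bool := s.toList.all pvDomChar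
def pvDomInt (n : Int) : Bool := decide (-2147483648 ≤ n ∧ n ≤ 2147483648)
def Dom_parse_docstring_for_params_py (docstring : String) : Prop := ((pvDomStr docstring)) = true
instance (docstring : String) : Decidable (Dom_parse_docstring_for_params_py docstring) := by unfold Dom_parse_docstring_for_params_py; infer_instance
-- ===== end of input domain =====

-- B replaces A's three-state parser loop with a find-then-slice decomposition (simpler, same cost).

-- ===== PORT A =====
-- state machine: 0 = BEFORE_PARAM, 1 = PARAM_HEADER, 2 = IN_PARAM; acc = param_text;
-- the if/elif chain on 'state' is transcribed as a match on the three state constants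
def pA_loop : List String → Nat → List String → List String
  | [], _, acc => acc
  | line :: rest, 0, acc =>
    if PySem.Str.isIn "Parameters" line then pA_loop rest 1 (acc ++ [line])
    else pA_loop rest 0 acc
  | line :: rest, 1, acc => pA_loop rest 2 (acc ++ [line])
  | line :: rest, _+2, acc =>
    let sline := PySem.Str.strip line
    -- 'if sline and all(ch == '-' for ch in sline): param_text.pop(); break'
    if !sline.toList.isEmpty && sline.toList.all (· == '-') then acc.dropLast
    else pA_loop rest 2 (acc ++ [line])

def parse_docstring_for_params_py (docstring : String) : String :=
  PySem.Str.join "\n" (pA_loop ((PySem.Str.split? docstring "\n").getD []) 0 [])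

-- ===== PORT B =====
def isDashLine (line : String) : Bool :=
  let s := PySem.Str.strip line
  -- bool(s) and set(s) == {'-'}  ⟺  s nonempty and every char is '-'
  !s.toList.isEmpty && s.toList.all (· == '-')

def parse_docstring_for_params_py_alt (docstring : String) : String :=
  let lines := (PySem.Str.split? docstring "\n").getD []
  match lines.findIdx? (fun line => PySem.Str.isIn "Parameters" line) with
  | none => ""
  | some i =>
    -- j = first index ≥ i+2 with a dash line is i+2+k; lines[i:j-1] = (lines.drop i).take (k+1)
    match (lines.drop (i+2)).findIdx? isDashLine with
    | none => PySem.Str.join "\n" (lines.drop i)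
    | some k => PySem.Str.join "\n" ((lines.drop i).take (k+1))

-- ===== PRECONDITION & SPEC =====
def Spec_parse_docstring_for_params_py (docstring : String) (out : String) : Prop := out = parse_docstring_for_params_py_alt docstring
instance (docstring : String) (out : String) : Decidable (Spec_parse_docstring_for_params_py docstring out) := by unfold Spec_parse_docstring_for_params_py; infer_instance

-- ===== CLAIM (what is proved, stated in full; the proofs are below) =====
def Claim_equal_parse_docstring_for_params_py : Prop := ∀ (docstring : String), Dom_parse_docstring_for_params_py docstring → Spec_parse_docstring_for_params_py docstring (parse_docstring_for_params_py docstring)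

-- ===== LEMMAS AND PROOFS =====

lemma dropLast_take_succ {α : Type} (xs : List α) (n : Nat) (h : n < xs.length) :
    (xs.take (n+1)).dropLast = xs.take n := by
  rw [List.dropLast_eq_take, List.take_take]
  have : (xs.take (n+1)).length = n + 1 := by
    rw [List.length_take]; omega
  rw [this]
  simp

-- characterisation of A's loop in state IN_PARAM
lemma pA_loop_two (ls : List String) : ∀ acc : List String,
    pA_loop ls 2 acc =
      match ls.findIdx? isDashLine with
      | none => acc ++ ls
      | some k => (acc ++ ls.take k).dropLast := by
  induction ls with
  | nil => intro acc; simp [pA_loop]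
  | cons x xs ih =>
    intro acc
    rw [List.findIdx?_cons]
    by_cases hx : isDashLine x = true
    · have hstep : pA_loop (x :: xs) 2 acc = acc.dropLast := by
        simp only [isDashLine] at hx
        simp only [pA_loop]
        rw [if_pos hx]
      rw [hstep, hx]
      simp
    · have hx' : isDashLine x = false := by simp at hx; exact hx
      have hstep : pA_loop (x :: xs) 2 acc = pA_loop xs 2 (acc ++ [x]) := by
        simp only [isDashLine] at hx'
        simp only [pA_loop]
        rw [if_neg (by simp only [hx']; exact Bool.false_ne_true)]
      rw [hstep, ih, hx']
      cases hfi : xs.findIdx? isDashLine with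
      | none => simp
      | some k => simp [List.take_succ_cons]

lemma findIdx?_lt_length {α : Type} (p : α → Bool) (xs : List α) (k : Nat)
    (h : xs.findIdx? p = some k) : k < xs.length := by
  have := List.findIdx?_eq_some_iff_findIdx_eq.mp h
  omega

lemma pA_main (ls : List String) :
    PySem.Str.join "\n" (pA_loop ls 0 []) =
      (match ls.findIdx? (fun line => PySem.Str.isIn "Parameters" line) with
       | none => ""
       | some i =>
         match (ls.drop (i+2)).findIdx? isDashLine with
         | none => PySem.Str.join "\n" (ls.drop i)
         | some k => PySem.Str.join "\n" ((ls.drop i).take (k+1))) := by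
  induction ls with
  | nil => simp [pA_loop]; decide
  | cons l t ih =>
    rw [List.findIdx?_cons]
    by_cases hl : PySem.Str.isIn "Parameters" l = true
    · rw [if_pos hl]
      have h0 : pA_loop (l :: t) 0 [] = pA_loop t 1 [l] := by
        simp only [pA_loop]; rw [if_pos hl]; rfl
      rw [h0]
      cases t with
      | nil => simp [pA_loop]
      | cons h t2 =>
        have h1 : pA_loop (h :: t2) 1 [l] = pA_loop t2 2 [l, h] := rfl
        rw [h1, pA_loop_two]
        simp only [List.drop_succ_cons, List.drop_zero]
        cases hfi : t2.findIdx? isDashLine with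
        | none => simp
        | some k =>
          simp only
          congr 1
          have hk := findIdx?_lt_length _ _ _ hfi
          have hpre : ([l, h] ++ t2.take k) = (l :: h :: t2).take (k+2) := by
            simp [List.take_succ_cons]
          rw [hpre, dropLast_take_succ _ _ (by simp; omega)]
    · rw [if_neg hl]
      have h0 : pA_loop (l :: t) 0 [] = pA_loop t 0 [] := by
        simp only [pA_loop]; rw [if_neg hl]
      rw [h0, ih]
      cases hfi : t.findIdx? (fun line => PySem.Str.isIn "Parameters" line) with
      | none => simp
      | some i => simp [List.drop_succ_cons]

-- ===== VERDICT (by name: the statement is the Claim_ definition above) =====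
theorem parse_docstring_for_params_py_spec : Claim_equal_parse_docstring_for_params_py := by
  intro docstring _
  show parse_docstring_for_params_py docstring = parse_docstring_for_params_py_alt docstring
  simp only [parse_docstring_for_params_py, parse_docstring_for_params_py_alt]
  exact pA_main ((PySem.Str.split? docstring "\n").getD [])
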